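-- pv_equiv track=rewrite | github.com/zuzivian/eecs337-recipes | steps.py | get_punctuation_index
-- ===== SOURCE A (Python) =====
-- def get_punctuation_index(text, dir):
--     punctuation = [".", ",", ";"]
--     indices = []
--     for punct in punctuation:
--         index = text.rfind(punct) if dir else text.find(punct)
--         if index > -1:
--             indices.append(index)
--     if len(indices) == 0:
--         return 0
--     return max(indices) if dir else min(indices)
-- ===== SOURCE B (Python) =====
-- def get_punctuation_index(text, dir):
--     result = None
--     for i, ch in enumerate(text):
--         if ch in {'.', ',', ';'}:
--             result = i
--             if not dir:
--                 break
--     return 0 if result is None else result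
-- ===== Notes on version B (the rewrite author's own statement) =====
-- stated objective: idiomatic
-- what changed: Replaced three separate find/rfind scans plus a min/max over collected indices with one direct pass over enumerate(text) that keeps the first (or last) index of any punctuation character.
import Mathlib
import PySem

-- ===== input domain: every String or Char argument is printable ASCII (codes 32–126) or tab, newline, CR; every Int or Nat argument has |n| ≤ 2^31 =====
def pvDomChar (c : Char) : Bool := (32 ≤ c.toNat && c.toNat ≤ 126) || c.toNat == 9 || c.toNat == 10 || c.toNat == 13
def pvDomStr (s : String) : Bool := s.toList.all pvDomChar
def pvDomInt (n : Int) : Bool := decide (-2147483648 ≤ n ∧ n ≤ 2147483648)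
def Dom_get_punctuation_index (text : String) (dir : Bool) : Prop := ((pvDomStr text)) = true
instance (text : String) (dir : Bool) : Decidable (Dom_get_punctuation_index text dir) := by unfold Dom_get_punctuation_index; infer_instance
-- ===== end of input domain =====

-- B replaces A's three find/rfind library scans plus min/max over the collected
-- indices with one direct pass over enumerate(text) (objective: idiomatic single pass).

-- ===== PORT A =====
def get_punctuation_index (text : String) (dir : Bool) : Int :=
  let punctuation : List String := [".", ",", ";"]
  let indices : List Int := punctuation.foldl (fun acc punct =>
    let index : Int := if dir then PySem.Str.rfind text punct else PySem.Str.find text punct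
    if index > -1 then acc ++ [index] else acc) []
  if indices.length = 0 then 0
  else if dir then (PySem.List.max? indices (fun x => x)).getD 0   -- max(indices); the list is nonempty here, so getD's default is unreachable
  else (PySem.List.min? indices (fun x => x)).getD 0               -- min(indices); same remark

-- ===== PORT B =====
-- the loop of Source B: result = None; for i, ch in enumerate(text): if ch in {'.',',',';'}: result = i; if not dir: break
def pvGoB (dir : Bool) : List (Int × Char) → Option Int → Option Int
  | [], res => res
  | (i, ch) :: rest, res =>
    if ch = '.' || ch = ',' || ch = ';' then
      (if dir then pvGoB dir rest (some i) else some i)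
    else pvGoB dir rest res

def get_punctuation_index_alt (text : String) (dir : Bool) : Int :=
  match pvGoB dir (PySem.List.enumerate text.toList) none with
  | none => 0
  | some i => i

-- ===== PRECONDITION & SPEC =====
def Spec_get_punctuation_index (text : String) (dir : Bool) (out : Int) : Prop := out = get_punctuation_index_alt text dir
instance (text : String) (dir : Bool) (out : Int) : Decidable (Spec_get_punctuation_index text dir out) := by unfold Spec_get_punctuation_index; infer_instance

-- ===== CLAIM (what is proved, stated in full; the proofs are below) =====
def Claim_equal_get_punctuation_index : Prop := ∀ (text : String) (dir : Bool), Dom_get_punctuation_index text dir → Spec_get_punctuation_index text dir (get_punctuation_index text dir)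

-- ===== LEMMAS AND PROOFS =====

def pvIsPunct (c : Char) : Bool := c = '.' || c = ',' || c = ';'

def pvFirst? : List Char → Option Nat
  | [] => none
  | c :: t => if pvIsPunct c then some 0 else (pvFirst? t).map (· + 1)

def pvLast? : List Char → Option Nat
  | [] => none
  | c :: t => match pvLast? t with
    | some k => some (k + 1)
    | none => if pvIsPunct c then some 0 else none

def pvPunctAt (l : List Char) (i : Nat) : Bool :=
  match l[i]? with
  | some c => pvIsPunct c
  | none => false

-- ---- B-side characterisation ----

lemma pvGoB_false (l : List Char) (s : Int) :
    pvGoB false (PySem.List.enumerate l s) none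
      = (pvFirst? l).map (fun k => s + (k : Int)) := by
  induction l generalizing s with
  | nil => rfl
  | cons c t ih =>
    show pvGoB false ((s, c) :: PySem.List.enumerate t (s + 1)) none = _
    cases hc : pvIsPunct c with
    | true =>
      have hc' : (c = '.' || c = ',' || c = ';') = true := hc
      simp [pvGoB, hc', pvFirst?, hc]
    | false =>
      have hc' : (c = '.' || c = ',' || c = ';') = false := hc
      simp only [pvGoB, hc', Bool.false_eq_true, if_false, ih, pvFirst?, hc]
      cases h : pvFirst? t with
      | none => simp
      | some k => simp; push_cast; ring

lemma pvGoB_true (l : List Char) (s : Int) (acc : Option Int) :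
    pvGoB true (PySem.List.enumerate l s) acc
      = (match pvLast? l with
         | some k => some (s + (k : Int))
         | none => acc) := by
  induction l generalizing s acc with
  | nil => rfl
  | cons c t ih =>
    show pvGoB true ((s, c) :: PySem.List.enumerate t (s + 1)) acc = _
    cases hc : pvIsPunct c with
    | true =>
      have hc' : (c = '.' || c = ',' || c = ';') = true := hc
      simp only [pvGoB, hc', if_true, ih, pvLast?, hc]
      cases h : pvLast? t with
      | none => simp
      | some k => simp; push_cast; ring
    | false =>
      have hc' : (c = '.' || c = ',' || c = ';') = false := hc
      simp only [pvGoB, hc', Bool.false_eq_true, if_false, ih, pvLast?, hc]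
      cases h : pvLast? t with
      | none => simp
      | some k => simp; push_cast; ring

-- ---- pvFirst? / pvLast? index facts ----

lemma pvFirst_none (l : List Char) (h : pvFirst? l = none) :
    ∀ i : Nat, pvPunctAt l i = false := by
  induction l with
  | nil => intro i; simp [pvPunctAt]
  | cons c t ih =>
    intro i
    cases hc : pvIsPunct c with
    | true => simp [pvFirst?, hc] at h
    | false =>
      simp [pvFirst?, hc] at h
      cases i with
      | zero => simpa [pvPunctAt] using hc
      | succ j => simpa [pvPunctAt] using ih h j

lemma pvFirst_some (l : List Char) (k : Nat) (h : pvFirst? l = some k) :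
    pvPunctAt l k = true ∧ ∀ i < k, pvPunctAt l i = false := by
  induction l generalizing k with
  | nil => simp [pvFirst?] at h
  | cons c t ih =>
    cases hc : pvIsPunct c with
    | true =>
      simp [pvFirst?, hc] at h
      refine ⟨?_, ?_⟩
      · rw [← h]; simpa [pvPunctAt] using hc
      · intro i hi; omega
    | false =>
      simp only [pvFirst?, hc, Bool.false_eq_true, if_false, Option.map_eq_some_iff] at h
      obtain ⟨k', hk', rfl⟩ := h
      obtain ⟨h1, h2⟩ := ih k' hk'
      refine ⟨by simpa [pvPunctAt] using h1, ?_⟩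
      intro i hi
      cases i with
      | zero => simpa [pvPunctAt] using hc
      | succ j => simpa [pvPunctAt] using h2 j (by omega)

lemma pvLast_none (l : List Char) (h : pvLast? l = none) :
    ∀ i : Nat, pvPunctAt l i = false := by
  induction l with
  | nil => intro i; simp [pvPunctAt]
  | cons c t ih =>
    intro i
    cases ht : pvLast? t with
    | some k => simp [pvLast?, ht] at h
    | none =>
      cases hc : pvIsPunct c with
      | true => simp [pvLast?, ht, hc] at h
      | false =>
        cases i with
        | zero => simpa [pvPunctAt] using hc
        | succ j => simpa [pvPunctAt] using ih ht j

lemma pvLast_some (l : List Char) (k : Nat) (h : pvLast? l = some k) :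
    pvPunctAt l k = true ∧ ∀ i : Nat, k < i → pvPunctAt l i = false := by
  induction l generalizing k with
  | nil => simp [pvLast?] at h
  | cons c t ih =>
    cases ht : pvLast? t with
    | some k' =>
      simp [pvLast?, ht] at h
      obtain ⟨h1, h2⟩ := ih k' ht
      refine ⟨?_, ?_⟩
      · rw [← h]; simpa [pvPunctAt] using h1
      · intro i hi
        rw [← h] at hi
        cases i with
        | zero => omega
        | succ j => simpa [pvPunctAt] using h2 j (by omega)
    | none =>
      cases hc : pvIsPunct c with
      | true =>
        simp [pvLast?, ht, hc] at h
        refine ⟨?_, ?_⟩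
        · rw [← h]; simpa [pvPunctAt] using hc
        · intro i hi
          cases i with
          | zero => omega
          | succ j => simpa [pvPunctAt] using pvLast_none t ht j
      | false => simp [pvLast?, ht, hc] at h

-- ---- single-character find / rfind facts ----

lemma pvSingle_prefix_iff (xs : List Char) (c : Char) :
    [c] <+: xs ↔ xs.head? = some c := by
  cases xs with
  | nil => simp
  | cons a t => simp [List.cons_prefix_cons, eq_comm]

lemma pvPrefix_drop_iff (l : List Char) (i : Nat) (c : Char) :
    [c] <+: l.drop i ↔ l[i]? = some c := by
  rw [pvSingle_prefix_iff, List.head?_drop]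

lemma pvFindC_occ (l : List Char) (c : Char) (h : -1 < PySem.Chars.find l [c]) :
    l[(PySem.Chars.find l [c]).toNat]? = some c := by
  have h0 : 0 ≤ PySem.Chars.find l [c] := by omega
  have := (PySem.Chars.find_spec h0).1
  rwa [pvPrefix_drop_iff] at this

lemma pvFindC_eq (l : List Char) (c : Char) (k : Nat)
    (hc : l[k]? = some c) (hmin : ∀ i < k, l[i]? ≠ some c) :
    PySem.Chars.find l [c] = (k : Int) := by
  have hin : PySem.Chars.isIn [c] l = true := by
    rw [← PySem.Chars.exists_prefix_drop_iff_isIn]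
    exact ⟨k, (pvPrefix_drop_iff l k c).mpr hc⟩
  have h0 : 0 ≤ PySem.Chars.find l [c] := by
    rw [PySem.Chars.find_nonneg_iff]
    exact (PySem.Chars.isIn_iff_infix [c] l).mp hin
  obtain ⟨h1, h2⟩ := PySem.Chars.find_spec h0
  rw [pvPrefix_drop_iff] at h1
  have hne : (PySem.Chars.find l [c]).toNat = k := by
    by_contra hne
    rcases Nat.lt_or_ge (PySem.Chars.find l [c]).toNat k with hlt | hge
    · exact hmin _ hlt h1
    · have hklt : k < (PySem.Chars.find l [c]).toNat := by omega
      exact h2 k hklt ((pvPrefix_drop_iff l k c).mpr hc)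
  omega

lemma pvFindC_neg (l : List Char) (c : Char) (h : ∀ i : Nat, l[i]? ≠ some c) :
    PySem.Chars.find l [c] = -1 := by
  rw [PySem.Chars.find_eq_neg_one_iff]
  intro hinf
  have hin : PySem.Chars.isIn [c] l = true := (PySem.Chars.isIn_iff_infix [c] l).mpr hinf
  obtain ⟨j, hj⟩ := (PySem.Chars.exists_prefix_drop_iff_isIn [c] l).mpr hin
  exact h j ((pvPrefix_drop_iff l j c).mp hj)

lemma pvRgo_neg (l : List Char) (c : Char) (h : ∀ i : Nat, l[i]? ≠ some c) :
    ∀ j : Nat, PySem.Chars.rfind.go l [c] j = -1 := by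
  intro j
  induction j with
  | zero =>
    have hp : ¬ ([c].isPrefixOf l = true) := by
      intro hp
      exact h 0 ((pvPrefix_drop_iff l 0 c).mp (List.isPrefixOf_iff_prefix.mp hp))
    rw [PySem.Chars.rfind.go.eq_def]
    show (if [c].isPrefixOf l = true then (0 : Int) else -1) = -1
    rw [if_neg hp]
  | succ j ih =>
    have hp : ¬ ([c].isPrefixOf (l.drop (j + 1)) = true) := by
      intro hp
      exact h (j + 1) ((pvPrefix_drop_iff l (j + 1) c).mp (List.isPrefixOf_iff_prefix.mp hp))
    rw [PySem.Chars.rfind.go.eq_def]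
    show (if [c].isPrefixOf (l.drop (j + 1)) = true then ((j + 1 : Nat) : Int) else PySem.Chars.rfind.go l [c] j) = -1
    rw [if_neg hp, ih]

lemma pvRgo_eq (l : List Char) (c : Char) (k : Nat)
    (hc : l[k]? = some c) (hmax : ∀ i : Nat, k < i → l[i]? ≠ some c) :
    ∀ j : Nat, k ≤ j → PySem.Chars.rfind.go l [c] j = (k : Int) := by
  intro j
  induction j with
  | zero =>
    intro hkj
    have hk0 : k = 0 := by omega
    subst hk0
    have hp : [c].isPrefixOf l = true :=
      List.isPrefixOf_iff_prefix.mpr ((pvPrefix_drop_iff l 0 c).mpr hc)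
    rw [PySem.Chars.rfind.go.eq_def]
    show (if [c].isPrefixOf l = true then (0 : Int) else -1) = ((0 : Nat) : Int)
    rw [if_pos hp]
    norm_num
  | succ j ih =>
    intro hkj
    rw [PySem.Chars.rfind.go.eq_def]
    show (if [c].isPrefixOf (l.drop (j + 1)) = true then ((j + 1 : Nat) : Int) else PySem.Chars.rfind.go l [c] j) = (k : Int)
    by_cases hk : k = j + 1
    · have hc' : l[j + 1]? = some c := by rw [← hk]; exact hc
      have hp : [c].isPrefixOf (l.drop (j + 1)) = true :=
        List.isPrefixOf_iff_prefix.mpr ((pvPrefix_drop_iff l (j + 1) c).mpr hc')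
      rw [if_pos hp, hk]
    · have hp : ¬ ([c].isPrefixOf (l.drop (j + 1)) = true) := by
        intro hp
        exact hmax (j + 1) (by omega) ((pvPrefix_drop_iff l (j + 1) c).mp (List.isPrefixOf_iff_prefix.mp hp))
      rw [if_neg hp, ih (by omega)]

lemma pvRgo_occ (l : List Char) (c : Char) :
    ∀ j : Nat, -1 < PySem.Chars.rfind.go l [c] j →
      l[(PySem.Chars.rfind.go l [c] j).toNat]? = some c := by
  intro j
  induction j with
  | zero =>
    rw [PySem.Chars.rfind.go.eq_def]
    show -1 < (if [c].isPrefixOf l = true then (0 : Int) else -1) →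
      l[(if [c].isPrefixOf l = true then (0 : Int) else -1).toNat]? = some c
    by_cases hp : [c].isPrefixOf l = true
    · rw [if_pos hp]
      intro _
      simpa using (pvPrefix_drop_iff l 0 c).mp (List.isPrefixOf_iff_prefix.mp hp)
    · rw [if_neg hp]; omega
  | succ j ih =>
    rw [PySem.Chars.rfind.go.eq_def]
    show -1 < (if [c].isPrefixOf (l.drop (j + 1)) = true then ((j + 1 : Nat) : Int) else PySem.Chars.rfind.go l [c] j) →
      l[(if [c].isPrefixOf (l.drop (j + 1)) = true then ((j + 1 : Nat) : Int) else PySem.Chars.rfind.go l [c] j).toNat]? = some c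
    by_cases hp : [c].isPrefixOf (l.drop (j + 1)) = true
    · rw [if_pos hp]
      intro _
      simpa using (pvPrefix_drop_iff l (j + 1) c).mp (List.isPrefixOf_iff_prefix.mp hp)
    · rw [if_neg hp]; exact ih

lemma pvRfindC_occ (l : List Char) (c : Char) (h : -1 < PySem.Chars.rfind l [c]) :
    l[(PySem.Chars.rfind l [c]).toNat]? = some c :=
  pvRgo_occ l c l.length h

lemma pvRfindC_eq (l : List Char) (c : Char) (k : Nat)
    (hc : l[k]? = some c) (hmax : ∀ i : Nat, k < i → l[i]? ≠ some c) :
    PySem.Chars.rfind l [c] = (k : Int) := by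
  have hk : k < l.length := by
    rcases List.getElem?_eq_some_iff.mp hc with ⟨h, _⟩
    exact h
  exact pvRgo_eq l c k hc hmax l.length (by omega)

lemma pvRfindC_neg (l : List Char) (c : Char) (h : ∀ i : Nat, l[i]? ≠ some c) :
    PySem.Chars.rfind l [c] = -1 :=
  pvRgo_neg l c h l.length

-- ---- combining the three per-character scans ----

lemma pvPunctAt_iff (l : List Char) (i : Nat) :
    pvPunctAt l i = true ↔ ∃ c, l[i]? = some c ∧ pvIsPunct c = true := by
  unfold pvPunctAt
  cases h : l[i]? <;> simp

lemma pvPunct_cases (c : Char) (h : pvIsPunct c = true) :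
    c = '.' ∨ c = ',' ∨ c = ';' := by
  unfold pvIsPunct at h
  simp only [Bool.or_eq_true, decide_eq_true_eq] at h
  tauto

lemma pvMem_if_append (x y : Int) (acc : List Int) (c : Prop) [Decidable c] :
    (x ∈ (if c then acc ++ [y] else acc)) ↔ (x ∈ acc ∨ (c ∧ x = y)) := by
  split_ifs with h <;> simp [h]

lemma pvMem_if_single (x y : Int) (c : Prop) [Decidable c] :
    (x ∈ (if c then [y] else ([] : List Int))) ↔ (c ∧ x = y) := by
  split_ifs with h <;> simp [h]

lemma pvMin_core (I : List Int) (k : Nat)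
    (hmem : (k : Int) ∈ I) (hge : ∀ x ∈ I, (k : Int) ≤ x) :
    (if I.length = 0 then (0 : Int) else (PySem.List.min? I (fun x => x)).getD 0) = (k : Int) := by
  have hne : I ≠ [] := by intro h; subst h; cases hmem
  rw [if_neg (by simpa [List.length_eq_zero_iff] using hne)]
  cases hm : PySem.List.min? I (fun x => x) with
  | none => exact absurd ((PySem.List.min?_eq_none_iff I _).mp hm) hne
  | some m =>
    have h1 : m ∈ I := PySem.List.min?_mem hm
    have h2 : m ≤ (k : Int) := PySem.List.min?_isMin hm _ hmem
    have h3 : (k : Int) ≤ m := hge m h1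
    simp only [Option.getD_some]
    omega

lemma pvMax_core (I : List Int) (k : Nat)
    (hmem : (k : Int) ∈ I) (hle : ∀ x ∈ I, x ≤ (k : Int)) :
    (if I.length = 0 then (0 : Int) else (PySem.List.max? I (fun x => x)).getD 0) = (k : Int) := by
  have hne : I ≠ [] := by intro h; subst h; cases hmem
  rw [if_neg (by simpa [List.length_eq_zero_iff] using hne)]
  cases hm : PySem.List.max? I (fun x => x) with
  | none => exact absurd ((PySem.List.max?_eq_none_iff I _).mp hm) hne
  | some m =>
    have h1 : m ∈ I := PySem.List.max?_mem hm
    have h2 : (k : Int) ≤ m := PySem.List.max?_isMax hm _ hmem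
    have h3 : m ≤ (k : Int) := hle m h1
    simp only [Option.getD_some]
    omega

lemma pvMin_combine (x1 x2 x3 : Int) (k : Nat)
    (hmem : x1 = (k : Int) ∨ x2 = (k : Int) ∨ x3 = (k : Int))
    (h1 : -1 < x1 → (k : Int) ≤ x1) (h2 : -1 < x2 → (k : Int) ≤ x2) (h3 : -1 < x3 → (k : Int) ≤ x3) :
    (if (if x3 > -1 then (if x2 > -1 then (if x1 > -1 then ([] : List Int) ++ [x1] else []) ++ [x2] else (if x1 > -1 then ([] : List Int) ++ [x1] else [])) ++ [x3] else (if x2 > -1 then (if x1 > -1 then ([] : List Int) ++ [x1] else []) ++ [x2] else (if x1 > -1 then ([] : List Int) ++ [x1] else []))).length = 0 then (0 : Int)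
     else (PySem.List.min? (if x3 > -1 then (if x2 > -1 then (if x1 > -1 then ([] : List Int) ++ [x1] else []) ++ [x2] else (if x1 > -1 then ([] : List Int) ++ [x1] else [])) ++ [x3] else (if x2 > -1 then (if x1 > -1 then ([] : List Int) ++ [x1] else []) ++ [x2] else (if x1 > -1 then ([] : List Int) ++ [x1] else []))) (fun x => x)).getD 0) = (k : Int) := by
  apply pvMin_core
  · simp only [List.nil_append, pvMem_if_append, pvMem_if_single, or_assoc]
    have hk : (0 : Int) ≤ (k : Int) := by positivity
    rcases hmem with h | h | h
    · have hA : x1 > -1 ∧ (k : Int) = x1 := ⟨by omega, h.symm⟩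
      tauto
    · have hA : x2 > -1 ∧ (k : Int) = x2 := ⟨by omega, h.symm⟩
      tauto
    · have hA : x3 > -1 ∧ (k : Int) = x3 := ⟨by omega, h.symm⟩
      tauto
  · intro x hx
    simp only [List.nil_append, pvMem_if_append, pvMem_if_single, or_assoc] at hx
    rcases hx with ⟨hgt, rfl⟩ | ⟨hgt, rfl⟩ | ⟨hgt, rfl⟩
    · exact h1 (by omega)
    · exact h2 (by omega)
    · exact h3 (by omega)

lemma pvMax_combine (x1 x2 x3 : Int) (k : Nat)
    (hmem : x1 = (k : Int) ∨ x2 = (k : Int) ∨ x3 = (k : Int))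
    (h1 : -1 < x1 → x1 ≤ (k : Int)) (h2 : -1 < x2 → x2 ≤ (k : Int)) (h3 : -1 < x3 → x3 ≤ (k : Int)) :
    (if (if x3 > -1 then (if x2 > -1 then (if x1 > -1 then ([] : List Int) ++ [x1] else []) ++ [x2] else (if x1 > -1 then ([] : List Int) ++ [x1] else [])) ++ [x3] else (if x2 > -1 then (if x1 > -1 then ([] : List Int) ++ [x1] else []) ++ [x2] else (if x1 > -1 then ([] : List Int) ++ [x1] else []))).length = 0 then (0 : Int)
     else (PySem.List.max? (if x3 > -1 then (if x2 > -1 then (if x1 > -1 then ([] : List Int) ++ [x1] else []) ++ [x2] else (if x1 > -1 then ([] : List Int) ++ [x1] else [])) ++ [x3] else (if x2 > -1 then (if x1 > -1 then ([] : List Int) ++ [x1] else []) ++ [x2] else (if x1 > -1 then ([] : List Int) ++ [x1] else []))) (fun x => x)).getD 0) = (k : Int) := by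
  apply pvMax_core
  · simp only [List.nil_append, pvMem_if_append, pvMem_if_single, or_assoc]
    have hk : (0 : Int) ≤ (k : Int) := by positivity
    rcases hmem with h | h | h
    · have hA : x1 > -1 ∧ (k : Int) = x1 := ⟨by omega, h.symm⟩
      tauto
    · have hA : x2 > -1 ∧ (k : Int) = x2 := ⟨by omega, h.symm⟩
      tauto
    · have hA : x3 > -1 ∧ (k : Int) = x3 := ⟨by omega, h.symm⟩
      tauto
  · intro x hx
    simp only [List.nil_append, pvMem_if_append, pvMem_if_single, or_assoc] at hx
    rcases hx with ⟨hgt, rfl⟩ | ⟨hgt, rfl⟩ | ⟨hgt, rfl⟩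
    · exact h1 (by omega)
    · exact h2 (by omega)
    · exact h3 (by omega)

-- ---- A-side characterisation ----

lemma pvA_false (text : String) :
    get_punctuation_index text false
      = (match pvFirst? text.toList with
         | some k => (k : Int)
         | none => 0) := by
  have hdot : ".".toList = ['.'] := rfl
  have hcom : ",".toList = [','] := rfl
  have hsem : ";".toList = [';'] := rfl
  unfold get_punctuation_index
  simp only [List.foldl_cons, List.foldl_nil, Bool.false_eq_true, if_false,
    PySem.Str.find_eq, hdot, hcom, hsem]
  cases hf : pvFirst? text.toList with
  | none =>
    have hall := pvFirst_none _ hf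
    have hno : ∀ c : Char, pvIsPunct c = true → ∀ i : Nat, text.toList[i]? ≠ some c := by
      intro c hc i hic
      have : pvPunctAt text.toList i = true := (pvPunctAt_iff _ _).mpr ⟨c, hic, hc⟩
      rw [hall i] at this
      cases this
    rw [pvFindC_neg _ _ (hno '.' rfl), pvFindC_neg _ _ (hno ',' rfl), pvFindC_neg _ _ (hno ';' rfl)]
    norm_num
  | some k =>
    obtain ⟨hkP, hmin⟩ := pvFirst_some _ k hf
    obtain ⟨c0, hc0, hp0⟩ := (pvPunctAt_iff _ _).mp hkP
    have hminC : ∀ c : Char, pvIsPunct c = true → ∀ i < k, text.toList[i]? ≠ some c := by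
      intro c hc i hik hic
      have : pvPunctAt text.toList i = true := (pvPunctAt_iff _ _).mpr ⟨c, hic, hc⟩
      rw [hmin i hik] at this
      cases this
    have hge : ∀ c : Char, pvIsPunct c = true → -1 < PySem.Chars.find text.toList [c] →
        (k : Int) ≤ PySem.Chars.find text.toList [c] := by
      intro c hc hpos
      have hocc := pvFindC_occ _ _ hpos
      by_contra hlt
      push_neg at hlt
      exact hminC c hc _ (by omega) hocc
    have heq0 : PySem.Chars.find text.toList [c0] = (k : Int) :=
      pvFindC_eq _ _ k hc0 (hminC c0 hp0)
    have hmemd : PySem.Chars.find text.toList ['.'] = (k : Int) ∨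
        PySem.Chars.find text.toList [','] = (k : Int) ∨
        PySem.Chars.find text.toList [';'] = (k : Int) := by
      rcases pvPunct_cases c0 hp0 with rfl | rfl | rfl
      · exact Or.inl heq0
      · exact Or.inr (Or.inl heq0)
      · exact Or.inr (Or.inr heq0)
    exact pvMin_combine _ _ _ k hmemd (hge '.' rfl) (hge ',' rfl) (hge ';' rfl)

lemma pvA_true (text : String) :
    get_punctuation_index text true
      = (match pvLast? text.toList with
         | some k => (k : Int)
         | none => 0) := by
  have hdot : ".".toList = ['.'] := rfl
  have hcom : ",".toList = [','] := rfl
  have hsem : ";".toList = [';'] := rfl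
  unfold get_punctuation_index
  simp only [List.foldl_cons, List.foldl_nil, if_true,
    PySem.Str.rfind_eq, hdot, hcom, hsem]
  cases hf : pvLast? text.toList with
  | none =>
    have hall := pvLast_none _ hf
    have hno : ∀ c : Char, pvIsPunct c = true → ∀ i : Nat, text.toList[i]? ≠ some c := by
      intro c hc i hic
      have : pvPunctAt text.toList i = true := (pvPunctAt_iff _ _).mpr ⟨c, hic, hc⟩
      rw [hall i] at this
      cases this
    rw [pvRfindC_neg _ _ (hno '.' rfl), pvRfindC_neg _ _ (hno ',' rfl), pvRfindC_neg _ _ (hno ';' rfl)]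
    norm_num
  | some k =>
    obtain ⟨hkP, hmax⟩ := pvLast_some _ k hf
    obtain ⟨c0, hc0, hp0⟩ := (pvPunctAt_iff _ _).mp hkP
    have hmaxC : ∀ c : Char, pvIsPunct c = true → ∀ i : Nat, k < i → text.toList[i]? ≠ some c := by
      intro c hc i hik hic
      have : pvPunctAt text.toList i = true := (pvPunctAt_iff _ _).mpr ⟨c, hic, hc⟩
      rw [hmax i hik] at this
      cases this
    have hle : ∀ c : Char, pvIsPunct c = true → -1 < PySem.Chars.rfind text.toList [c] →
        PySem.Chars.rfind text.toList [c] ≤ (k : Int) := by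
      intro c hc hpos
      have hocc := pvRfindC_occ _ _ hpos
      by_contra hlt
      push_neg at hlt
      exact hmaxC c hc _ (by omega) hocc
    have heq0 : PySem.Chars.rfind text.toList [c0] = (k : Int) :=
      pvRfindC_eq _ _ k hc0 (hmaxC c0 hp0)
    have hmemd : PySem.Chars.rfind text.toList ['.'] = (k : Int) ∨
        PySem.Chars.rfind text.toList [','] = (k : Int) ∨
        PySem.Chars.rfind text.toList [';'] = (k : Int) := by
      rcases pvPunct_cases c0 hp0 with rfl | rfl | rfl
      · exact Or.inl heq0
      · exact Or.inr (Or.inl heq0)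
      · exact Or.inr (Or.inr heq0)
    exact pvMax_combine _ _ _ k hmemd (hle '.' rfl) (hle ',' rfl) (hle ';' rfl)

-- ===== VERDICT (by name: the statement is the Claim_ definition above) =====
theorem get_punctuation_index_spec : Claim_equal_get_punctuation_index := by
  intro text dir _
  unfold Spec_get_punctuation_index get_punctuation_index_alt
  cases dir with
  | false =>
    rw [pvGoB_false, pvA_false]
    cases hf : pvFirst? text.toList with
    | none => simp
    | some k => simp
  | true =>
    rw [pvGoB_true, pvA_true]
    cases hf : pvLast? text.toList with
    | none => simp
    | some k => simp
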